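-- pv_equiv track=rewrite | github.com/ti2-group/sql-einsum | experiments/util/sat_solving.py | to_3_sat
-- ===== SOURCE A (Python) =====
-- def to_3_sat(clauses):
--     used_vars = set([abs(var) for clause in clauses for var in clause])
--     sat_clauses = []
--
--     for clause in clauses:
--         if len(clause) <= 3:
--             sat_clauses.append(clause)
--         else:
--             gen_3_sat_clauses, used_vars = _to_3_sat(clause, used_vars)
--             sat_clauses += gen_3_sat_clauses
--     return sat_clauses
--
-- def _to_3_sat(clause, used_vars):
--     gen_clauses = []
--     unused = max(used_vars) + 1
--     new_vars = [unused]
--     gen_clauses.append([clause[0], clause[1], unused])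
--     for i in range(2, len(clause)-2):
--         new_clauses = [-unused, clause[i], unused+1]
--         gen_clauses.append(new_clauses)
--         unused = unused + 1
--         new_vars.append(unused)
--     gen_clauses.append([-unused, clause[-2], clause[-1]])
--     used_vars = used_vars.union(set(new_vars))
--     return gen_clauses, used_vars
-- ===== SOURCE B (Python) =====
-- def to_3_sat(clauses):
--     next_id = 1 + max((abs(v) for clause in clauses for v in clause), default=0)
--     sat_clauses = []
--     for clause in clauses:
--         if len(clause) <= 3:
--             sat_clauses.append(clause)
--         else:
--             expanded, next_id = _expand(clause, next_id)
--             sat_clauses += expanded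
--     return sat_clauses
--
-- def _expand(clause, next_id):
--     if len(clause) <= 3:
--         return [clause], next_id
--     rest, final_id = _expand([-next_id] + clause[2:], next_id + 1)
--     return [[clause[0], clause[1], next_id]] + rest, final_id
-- ===== Notes on version B (the rewrite author's own statement) =====
-- stated objective: simpler
-- what changed: Replaces A's threaded set of used variables (rebuilt/unioned and re-maxed per long clause) and its explicit window-index inner loop with a single integer counter computed once up front and a recursive clause-splitting helper _expand(clause, next_id) that peels two literals at a time.
import Mathlib
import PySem

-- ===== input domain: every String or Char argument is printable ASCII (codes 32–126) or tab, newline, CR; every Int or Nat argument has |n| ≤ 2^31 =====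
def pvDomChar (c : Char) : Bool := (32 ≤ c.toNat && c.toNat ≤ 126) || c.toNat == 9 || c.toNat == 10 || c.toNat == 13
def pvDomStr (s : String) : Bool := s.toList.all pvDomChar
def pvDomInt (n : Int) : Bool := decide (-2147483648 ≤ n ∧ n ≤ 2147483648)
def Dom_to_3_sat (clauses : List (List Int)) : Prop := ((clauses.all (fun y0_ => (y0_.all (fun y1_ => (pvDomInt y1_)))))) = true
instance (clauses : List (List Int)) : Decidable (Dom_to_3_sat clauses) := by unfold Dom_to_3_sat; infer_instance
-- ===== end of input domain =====

-- B replaces A's threaded set of used variables (with a max(set) per long clause) and its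
-- window-index inner loop by one upfront integer counter and a recursive clause-splitting helper.

-- ===== PORT A =====
-- _to_3_sat(clause, used_vars); called only with len(clause) > 3, so max() sees a nonempty
-- set and the indexings clause[0], clause[1], clause[-2], clause[-1] are in range (the
-- getD defaults below are unreachable on those calls).
def to_3_sat_aux (clause : List Int) (used_vars : PySem.Set Int) :
    List (List Int) × PySem.Set Int :=
  let unused : Int := (PySem.List.max? used_vars (fun x => x)).getD 0 + 1
  let new_vars : List Int := [unused]
  let gen_clauses : List (List Int) :=
    [[PySem.List.pyGetD clause 0 0, PySem.List.pyGetD clause 1 0, unused]]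
  let st :=
    (PySem.List.pyRange 2 (PySem.List.len clause - 2) 1).foldl
      (fun (st : List (List Int) × Int × List Int) i =>
        let new_clauses : List Int := [-st.2.1, PySem.List.pyGetD clause i 0, st.2.1 + 1]
        (st.1 ++ [new_clauses], st.2.1 + 1, st.2.2 ++ [st.2.1 + 1]))
      (gen_clauses, unused, new_vars)
  (st.1 ++ [[-st.2.1, PySem.List.pyGetD clause (-2) 0, PySem.List.pyGetD clause (-1) 0]],
   PySem.Set.union used_vars (PySem.Set.ofList st.2.2))

def to_3_sat (clauses : List (List Int)) : List (List Int) :=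
  let used_vars : PySem.Set Int :=
    PySem.Set.ofList (clauses.flatMap (fun clause => clause.map (fun v => |v|)))
  (clauses.foldl
    (fun (st : List (List Int) × PySem.Set Int) clause =>
      if PySem.List.len clause ≤ 3 then (st.1 ++ [clause], st.2)
      else
        let r := to_3_sat_aux clause st.2
        (st.1 ++ r.1, r.2))
    ([], used_vars)).1

-- ===== PORT B =====
-- _expand(clause, next_id): recursive splitting; indexings clause[0], clause[1] are in
-- range in the recursive branch (len > 3), so the getD defaults are unreachable.
def to_3_sat_expand (clause : List Int) (next_id : Int) :
    List (List Int) × Int :=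
  if _h : PySem.List.len clause ≤ 3 then ([clause], next_id)
  else
    let rest := to_3_sat_expand ((-next_id) :: clause.drop 2) (next_id + 1)
    ([[PySem.List.pyGetD clause 0 0, PySem.List.pyGetD clause 1 0, next_id]] ++ rest.1,
     rest.2)
termination_by clause.length
decreasing_by
  simp only [PySem.List.len_eq, not_le] at _h
  simp only [List.length_cons, List.length_drop]
  omega

def to_3_sat_alt (clauses : List (List Int)) : List (List Int) :=
  let next_id : Int :=
    1 + PySem.List.maxD (clauses.flatMap (fun clause => clause.map (fun v => |v|)))
          (fun x => x) 0
  (clauses.foldl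
    (fun (st : List (List Int) × Int) clause =>
      if PySem.List.len clause ≤ 3 then (st.1 ++ [clause], st.2)
      else
        let r := to_3_sat_expand clause st.2
        (st.1 ++ r.1, r.2))
    ([], next_id)).1

-- ===== PRECONDITION & SPEC =====
def Spec_to_3_sat (clauses : List (List Int)) (out : List (List Int)) : Prop := out = to_3_sat_alt clauses
instance (clauses : List (List Int)) (out : List (List Int)) : Decidable (Spec_to_3_sat clauses out) := by unfold Spec_to_3_sat; infer_instance

-- ===== CLAIM (what is proved, stated in full; the proofs are below) =====
def Claim_equal_to_3_sat : Prop := ∀ (clauses : List (List Int)), Dom_to_3_sat clauses → Spec_to_3_sat clauses (to_3_sat clauses)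

-- ===== LEMMAS AND PROOFS =====

-- The chain of clauses both programs generate for the tail d of a long clause, with u the
-- first fresh variable: [-u, d0, u+1], [-(u+1), d1, u+2], ..., [-(u+k), d(k), d(k+1)].
def tailChain : List Int → Int → List (List Int)
  | [], _ => []
  | [_], _ => []
  | [x, y], u => [[-u, x, y]]
  | x :: y :: z :: rest, u => [-u, x, u + 1] :: tailChain (y :: z :: rest) (u + 1)

-- Invariant linking A's set of used variables with B's integer counter.
def Pinv (used : PySem.Set Int) (nid : Int) : Prop :=
  (∀ x ∈ used, x ≤ nid - 1) ∧ ((nid - 1) ∈ used ∨ (used = [] ∧ nid = 1))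

lemma unused_eq (used : PySem.Set Int) (nid : Int) (h : Pinv used nid) :
    (PySem.List.max? used (fun x => x)).getD 0 + 1 = nid := by
  rcases used with _ | ⟨x, t⟩
  · rcases h.2 with h2 | ⟨_, h2⟩
    · simp at h2
    · rw [(PySem.List.max?_eq_none_iff ([] : List Int) (fun x => x)).mpr rfl]
      simp [h2]
  · rw [PySem.List.max?_id_cons]
    have hmem := PySem.List.foldl_max_mem t x
    have hle := PySem.List.le_foldl_max t x
    have h1 : List.foldl max x t ≤ nid - 1 := by
      rcases hmem with hm | hm
      · rw [hm]; exact h.1 x (by simp)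
      · exact h.1 _ (by simp [hm])
    have h2 : nid - 1 ≤ List.foldl max x t := by
      rcases h.2 with h2 | ⟨h2, _⟩
      · rcases List.mem_cons.mp h2 with he | ht
        · rw [he]; exact hle.1
        · exact hle.2 _ ht
      · simp at h2
    simp only [Option.getD_some]
    omega

lemma expand_eq : ∀ (d : List Int) (u a b : Int), 2 ≤ d.length →
    to_3_sat_expand (a :: b :: d) u = ([a, b, u] :: tailChain d u, u + d.length - 1) := by
  intro d
  induction d with
  | nil => intro u a b h; simp at h
  | cons x d' ih =>
    intro u a b h
    rcases d' with _ | ⟨y, _ | ⟨z, rest⟩⟩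
    · simp at h
    · rw [to_3_sat_expand, to_3_sat_expand]
      simp [tailChain]
      constructor
      · simp [PySem.List.pyGetD_ofNat']
      · ring
    · rw [to_3_sat_expand]
      have hlen : ¬ PySem.List.len (a :: b :: x :: y :: z :: rest) ≤ 3 := by
        simp [PySem.List.len_eq]; omega
      rw [dif_neg hlen]
      have hdrop : (a :: b :: x :: y :: z :: rest).drop 2 = x :: y :: z :: rest := rfl
      rw [hdrop]
      rw [ih (u + 1) (-u) x (by simp)]
      simp only [PySem.List.pyGetD_ofNat', List.getD_cons_succ, List.getD_cons_zero]
      rw [Prod.mk.injEq]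
      refine ⟨rfl, ?_⟩
      simp only [List.length_cons]; push_cast; ring

lemma loopA : ∀ (d : List Int), 2 ≤ d.length →
    ∀ (cl : List Int) (i u : Int) (gen : List (List Int)) (nv : List Int),
    0 ≤ i → cl.drop i.toNat = d →
    (let st := (PySem.List.pyRange i (PySem.List.len cl - 2) 1).foldl
        (fun (st : List (List Int) × Int × List Int) j =>
          (st.1 ++ [[-st.2.1, PySem.List.pyGetD cl j 0, st.2.1 + 1]], st.2.1 + 1,
           st.2.2 ++ [st.2.1 + 1]))
        (gen, u, nv)
     (st.1 ++ [[-st.2.1, PySem.List.pyGetD cl (-2) 0, PySem.List.pyGetD cl (-1) 0]], st.2.2))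
      = (gen ++ tailChain d u, nv ++ PySem.List.pyRange (u + 1) (u + d.length - 1) 1) := by
  intro d
  induction d with
  | nil => intro h; simp at h
  | cons x d' ih =>
    intro h cl i u gen nv hi hdrop
    have hclen : cl.length = i.toNat + (x :: d').length := by
      have hx : i.toNat ≤ cl.length := by
        by_contra hcon
        rw [List.drop_eq_nil_of_le (by omega)] at hdrop
        simp at hdrop
      have h2 := congrArg List.length hdrop
      rw [List.length_drop] at h2
      omega
    rcases d' with _ | ⟨y, d''⟩
    · simp at h
    rcases d'' with _ | ⟨z, rest⟩
    · -- d = [x, y] : the window loop is empty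
      have hrange : PySem.List.pyRange i (PySem.List.len cl - 2) 1 = [] := by
        apply PySem.List.pyRange_one_eq_nil
        have h2 : cl.length = i.toNat + 2 := by simpa using hclen
        simp only [PySem.List.len_eq]
        omega
      have hrange2 : PySem.List.pyRange (u + 1) (u + ([x, y] : List Int).length - 1) 1 = [] := by
        apply PySem.List.pyRange_one_eq_nil
        simp only [List.length_cons, List.length_nil]
        push_cast
        omega
      rw [hrange, hrange2]
      simp only [List.foldl_nil, List.append_nil, tailChain]
      have hg2 : PySem.List.pyGetD cl (-2) 0 = x := by
        rw [PySem.List.pyGetD_neg_ofNat cl 2 0 (by omega) (by omega)]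
        have : cl[cl.length - 2]? = some x := by
          have h0 : (cl.drop i.toNat)[0]? = some x := by rw [hdrop]; rfl
          rw [List.getElem?_drop] at h0
          simpa [show i.toNat + 0 = cl.length - 2 by simp at hclen; omega] using h0
        rw [List.getElem?_eq_getElem (by simp at hclen; omega)] at this
        exact Option.some.inj this
      have hg1 : PySem.List.pyGetD cl (-1) 0 = y := by
        rw [PySem.List.pyGetD_neg_ofNat cl 1 0 (by omega) (by omega)]
        have : cl[cl.length - 1]? = some y := by
          have h0 : (cl.drop i.toNat)[1]? = some y := by rw [hdrop]; rfl
          rw [List.getElem?_drop] at h0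
          simpa [show i.toNat + 1 = cl.length - 1 by simp at hclen; omega] using h0
        rw [List.getElem?_eq_getElem (by simp at hclen; omega)] at this
        exact Option.some.inj this
      rw [hg2, hg1]
    · -- d = x :: y :: z :: rest : peel one loop iteration
      have hlt : i < PySem.List.len cl - 2 := by
        simp [PySem.List.len_eq]; simp at hclen; omega
      rw [PySem.List.pyRange_one_cons hlt, List.foldl_cons]
      have hgx : PySem.List.pyGetD cl i 0 = x := by
        rw [PySem.List.pyGetD_eq_getElem cl 0 hi (by simp at hclen ⊢; omega)]
        have h0 : (cl.drop i.toNat)[0]? = some x := by rw [hdrop]; rfl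
        rw [List.getElem?_drop] at h0
        simp only [Nat.add_zero] at h0
        rw [List.getElem?_eq_getElem (by simp at hclen; omega)] at h0
        exact Option.some.inj h0
      have hdrop' : cl.drop (i + 1).toNat = y :: z :: rest := by
        have ht : (i + 1).toNat = i.toNat + 1 := by omega
        have h1 := congrArg (List.drop 1) hdrop
        rw [List.drop_drop] at h1
        rw [ht]
        simpa using h1
      have := ih (by simp) cl (i + 1) (u + 1)
        (gen ++ [[-u, PySem.List.pyGetD cl i 0, u + 1]]) (nv ++ [u + 1]) (by omega) hdrop'
      simp only at this ⊢
      rw [this, Prod.mk.injEq]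
      refine ⟨?_, ?_⟩
      · rw [hgx]
        simp [tailChain]
      · have hr : PySem.List.pyRange (u + 1) (u + ((x :: y :: z :: rest).length : Int) - 1) 1
            = (u + 1) :: PySem.List.pyRange (u + 1 + 1) (u + 1 + ((y :: z :: rest).length : Int) - 1) 1 := by
          have he : u + ((x :: y :: z :: rest).length : Int) - 1
              = u + 1 + ((y :: z :: rest).length : Int) - 1 := by
            simp only [List.length_cons]; push_cast; ring
          rw [he, PySem.List.pyRange_one_cons (by simp only [List.length_cons]; push_cast; omega)]
        rw [hr]
        simp

lemma aux_char (a b : Int) (d : List Int) (hd : 2 ≤ d.length) (used : PySem.Set Int)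
    (nid : Int) (hu : (PySem.List.max? used (fun x => x)).getD 0 + 1 = nid) :
    to_3_sat_aux (a :: b :: d) used =
      ([a, b, nid] :: tailChain d nid,
       PySem.Set.union used
         (PySem.Set.ofList ([nid] ++ PySem.List.pyRange (nid + 1) (nid + d.length - 1) 1))) := by
  have hL := loopA d hd (a :: b :: d) 2 nid [[a, b, nid]] [nid] (by norm_num) rfl
  simp only at hL
  unfold to_3_sat_aux
  simp only [hu, PySem.List.pyGetD_ofNat', List.getD_cons_succ, List.getD_cons_zero]
  rw [Prod.mk.injEq] at hL
  rw [Prod.mk.injEq]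
  refine ⟨by rw [hL.1]; rfl, by rw [hL.2]⟩

lemma Pinv_step (used : PySem.Set Int) (nid : Int) (k : Nat) (hk : 2 ≤ k) (hP : Pinv used nid) :
    Pinv (PySem.Set.union used
        (PySem.Set.ofList ([nid] ++ PySem.List.pyRange (nid + 1) (nid + (k : Int) - 1) 1)))
      (nid + (k : Int) - 1) := by
  constructor
  · intro x hx
    rw [PySem.Set.mem_union] at hx
    rcases hx with hx | hx
    · have := hP.1 x hx; omega
    · rw [PySem.Set.mem_ofList] at hx
      simp only [List.mem_append, List.mem_singleton, PySem.List.mem_pyRange_one] at hx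
      rcases hx with h | h <;> omega
  · left
    rw [PySem.Set.mem_union]
    right
    rw [PySem.Set.mem_ofList]
    simp only [List.mem_append, List.mem_singleton, PySem.List.mem_pyRange_one]
    by_cases h2 : k = 2
    · left; subst h2; omega
    · right; constructor <;> omega

lemma init_Pinv (V : List Int) :
    Pinv (PySem.Set.ofList V) (1 + PySem.List.maxD V (fun x => x) 0) := by
  rcases V with _ | ⟨x, t⟩
  · constructor
    · intro y hy
      rw [PySem.Set.mem_ofList] at hy
      simp at hy
    · right
      exact ⟨rfl, by simp [PySem.List.maxD, (PySem.List.max?_eq_none_iff ([] : List Int) (fun y => y)).mpr rfl]⟩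
  · have hm : PySem.List.maxD (x :: t) (fun y => y) 0 = List.foldl max x t := by
      simp [PySem.List.maxD, PySem.List.max?_id_cons]
    rw [hm]
    have hle := PySem.List.le_foldl_max t x
    constructor
    · intro y hy
      rw [PySem.Set.mem_ofList] at hy
      rcases List.mem_cons.mp hy with he | ht
      · subst he; have := hle.1; omega
      · have := hle.2 y ht; omega
    · left
      rw [PySem.Set.mem_ofList]
      have h0 : 1 + List.foldl max x t - 1 = List.foldl max x t := by ring
      rw [h0]
      rcases PySem.List.foldl_max_mem t x with hm2 | hm2
      · rw [hm2]; simp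
      · simp [hm2]

lemma fold_eq : ∀ (cls : List (List Int)) (out : List (List Int)) (used : PySem.Set Int) (nid : Int),
    Pinv used nid →
    (cls.foldl
        (fun (st : List (List Int) × PySem.Set Int) clause =>
          if PySem.List.len clause ≤ 3 then (st.1 ++ [clause], st.2)
          else
            let r := to_3_sat_aux clause st.2
            (st.1 ++ r.1, r.2))
        (out, used)).1
      = (cls.foldl
          (fun (st : List (List Int) × Int) clause =>
            if PySem.List.len clause ≤ 3 then (st.1 ++ [clause], st.2)
            else
              let r := to_3_sat_expand clause st.2
              (st.1 ++ r.1, r.2))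
          (out, nid)).1 := by
  intro cls
  induction cls with
  | nil => intro out used nid _; rfl
  | cons c cls ih =>
    intro out used nid hP
    by_cases hc : PySem.List.len c ≤ 3
    · simp only [List.foldl_cons, if_pos hc]
      exact ih (out ++ [c]) used nid hP
    · have hlen : 3 < c.length := by
        simp only [PySem.List.len_eq, not_le] at hc
        exact_mod_cast hc
      rcases c with _ | ⟨a, _ | ⟨b, d⟩⟩
      · simp at hlen
      · simp at hlen
      have hd : 2 ≤ d.length := by simp at hlen; omega
      have hu := unused_eq used nid hP
      have hA := aux_char a b d hd used nid hu
      have hB := expand_eq d nid a b hd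
      simp only [List.foldl_cons, if_neg hc]
      rw [hA, hB]
      simp only
      exact ih _ _ _ (Pinv_step used nid d.length hd hP)

theorem to_3_sat_spec : Claim_equal_to_3_sat := by
  intro clauses _
  unfold Spec_to_3_sat to_3_sat to_3_sat_alt
  simp only
  exact fold_eq clauses [] _ _ (init_Pinv _)
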